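-- pv_equiv track=rewrite | github.com/okoham/composites | clt.py | stacking_to_layup2
-- ===== SOURCE A (Python) =====
-- def stacking_to_layup2(stseq):
--     """Return a layup definition, from stacking sequence (no materials)"""
--     counts = {}
--     for ang in stseq:
--         if ang in counts:
--             counts[ang] += 1
--         else:
--             counts[ang] = 1
--     layup = sorted(counts.items(), key=lambda x: x[0])
--     return layup
-- ===== SOURCE B (Python) =====
-- def stacking_to_layup2(stseq):
--     """Return a layup definition, from stacking sequence (no materials)"""
--     layup = []
--     it = iter(sorted(stseq))
--     try:
--         cur = next(it)
--     except StopIteration: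
--         return layup
--     cnt = 1
--     for ang in it:
--         if ang == cur:
--             cnt += 1
--         else:
--             layup.append((cur, cnt))
--             cur, cnt = ang, 1
--     layup.append((cur, cnt))
--     return layup
-- ===== Notes on version B (the rewrite author's own statement) =====
-- stated objective: alternative
-- what changed: Replaces the hash-count-then-sort (dict of counts, then sorted(items)) by sort-then-group: sort the sequence once and emit (angle, run length) for each maximal run of equal angles.
import Mathlib
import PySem

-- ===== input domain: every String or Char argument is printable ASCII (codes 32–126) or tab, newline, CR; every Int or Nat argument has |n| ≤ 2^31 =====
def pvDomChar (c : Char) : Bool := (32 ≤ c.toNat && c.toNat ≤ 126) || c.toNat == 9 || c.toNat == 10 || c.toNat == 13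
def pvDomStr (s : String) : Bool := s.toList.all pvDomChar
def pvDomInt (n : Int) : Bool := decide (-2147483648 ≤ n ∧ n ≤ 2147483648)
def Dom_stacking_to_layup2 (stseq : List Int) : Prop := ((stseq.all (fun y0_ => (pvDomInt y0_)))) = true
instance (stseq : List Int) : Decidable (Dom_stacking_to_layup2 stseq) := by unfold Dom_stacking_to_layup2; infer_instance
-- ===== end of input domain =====

-- B replaces A's hash-count-then-sort (dict of counts, then sorted(items)) by sort-then-group: one scan over a sorted copy emitting (angle, run length); same return value, no speed claim.

-- ===== PORT A =====
-- counts = {}; for ang in stseq: if ang in counts: counts[ang] += 1 else: counts[ang] = 1; return sorted(counts.items(), key=lambda x: x[0])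
def stacking_to_layup2 (stseq : List Int) : List (Int × Int) :=
  PySem.List.sorted
    (stseq.foldl (fun d ang =>
        if d.contains ang then d.insert ang (d.getD ang 0 + 1) else d.insert ang 1)
      PySem.Dict.empty).items
    (fun x => x.1) false

-- ===== PORT B =====
-- the loop over the sorted iterator: current run key `cur`, run length `cnt`, emit on key change
def runLoop (cur : Int) (cnt : Int) : List Int → List (Int × Int)
  | [] => [(cur, cnt)]
  | ang :: rest =>
    if ang == cur then runLoop cur (cnt + 1) rest
    else (cur, cnt) :: runLoop ang 1 rest

def stacking_to_layup2_alt (stseq : List Int) : List (Int × Int) :=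
  match PySem.List.sorted stseq (fun x => x) false with
  | [] => []
  | x :: xs => runLoop x 1 xs

-- ===== PRECONDITION & SPEC =====
def Spec_stacking_to_layup2 (stseq : List Int) (out : List (Int × Int)) : Prop := out = stacking_to_layup2_alt stseq
instance (stseq : List Int) (out : List (Int × Int)) : Decidable (Spec_stacking_to_layup2 stseq out) := by unfold Spec_stacking_to_layup2; infer_instance

-- ===== CLAIM (what is proved, stated in full; the proofs are below) =====
def Claim_equal_stacking_to_layup2 : Prop := ∀ (stseq : List Int), Dom_stacking_to_layup2 stseq → Spec_stacking_to_layup2 stseq (stacking_to_layup2 stseq)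

-- ===== LEMMAS AND PROOFS =====

-- every key produced by runLoop is the current key or comes from the remaining list
theorem runLoop_key_mem (l : List Int) (cur cnt : Int) (p : Int × Int)
    (hp : p ∈ runLoop cur cnt l) : p.1 = cur ∨ p.1 ∈ l := by
  induction l generalizing cur cnt with
  | nil => simp [runLoop] at hp; simp [hp]
  | cons y ys ih =>
    simp only [runLoop] at hp
    by_cases h : (y == cur) = true
    · simp [h] at hp
      rcases ih cur (cnt + 1) hp with h' | h' <;> simp [h']
    · simp [h] at hp
      rcases hp with h' | h'
      · left; simp [h']
      · rcases ih y 1 h' with h'' | h'' <;> simp [h'', List.mem_cons]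

-- keys strictly increase along runLoop when the input run is sorted
theorem runLoop_pairwise (l : List Int) (cur cnt : Int)
    (h : (cur :: l).Pairwise (· ≤ ·)) :
    (runLoop cur cnt l).Pairwise (fun a b => a.1 < b.1) := by
  induction l generalizing cur cnt with
  | nil => simp [runLoop]
  | cons y ys ih =>
    rw [List.pairwise_cons] at h
    obtain ⟨hcur, hys⟩ := h
    simp only [runLoop]
    by_cases hy : (y == cur) = true
    · simp only [hy, if_true]
      apply ih
      rw [List.pairwise_cons]
      exact ⟨fun z hz => hcur z (List.mem_cons_of_mem _ hz), (List.pairwise_cons.mp hys).2⟩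
    · simp only [hy, Bool.false_eq_true, if_false]
      rw [List.pairwise_cons]
      refine ⟨?_, ih y 1 hys⟩
      intro p hp
      have hcy : cur < y :=
        lt_of_le_of_ne (hcur y List.mem_cons_self) (fun e => hy (by simp [e]))
      rcases runLoop_key_mem ys y 1 p hp with h' | h'
      · omega
      · have := (List.pairwise_cons.mp hys).1 p.1 h'
        omega

-- membership characterisation of runLoop on a sorted run
theorem runLoop_mem (l : List Int) (cur cnt : Int)
    (h : (cur :: l).Pairwise (· ≤ ·)) (k v : Int) :
    ((k, v) ∈ runLoop cur cnt l ↔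
      (k = cur ∧ v = cnt + (l.count cur : Int)) ∨
      (k ∈ l ∧ k ≠ cur ∧ v = (l.count k : Int))) := by
  induction l generalizing cur cnt with
  | nil => simp [runLoop]
  | cons y ys ih =>
    rw [List.pairwise_cons] at h
    obtain ⟨hcur, hys⟩ := h
    simp only [runLoop]
    by_cases hy : (y == cur) = true
    · have hyc : y = cur := by simpa using hy
      subst hyc
      simp only [hy, if_true]
      rw [ih y (cnt + 1) hys]
      constructor
      · rintro (⟨hk, hv⟩ | ⟨hk1, hk2, hv⟩)
        · left
          refine ⟨hk, ?_⟩
          subst hk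
          rw [List.count_cons_self]; push_cast; omega
        · right
          refine ⟨List.mem_cons_of_mem _ hk1, hk2, ?_⟩
          rw [List.count_cons_of_ne hk2.symm]; exact hv
      · rintro (⟨hk, hv⟩ | ⟨hk1, hk2, hv⟩)
        · left
          refine ⟨hk, ?_⟩
          subst hk
          rw [List.count_cons_self] at hv; push_cast at hv ⊢; omega
        · right
          rcases List.mem_cons.mp hk1 with h' | h'
          · exact absurd h' hk2
          · refine ⟨h', hk2, ?_⟩
            rw [List.count_cons_of_ne hk2.symm] at hv; exact hv
    · have hyne : y ≠ cur := fun e => hy (by simp [e])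
      have hcy : cur < y := lt_of_le_of_ne (hcur y List.mem_cons_self) (Ne.symm hyne)
      have hnotmem : cur ∉ y :: ys := by
        intro hc
        rcases List.mem_cons.mp hc with h' | h'
        · exact hyne h'.symm
        · have := (List.pairwise_cons.mp hys).1 cur h'; omega
      have hcount0 : (y :: ys).count cur = 0 := List.count_eq_zero.mpr hnotmem
      simp only [hy, Bool.false_eq_true, if_false, List.mem_cons]
      constructor
      · intro hp
        rcases hp with h' | h'
        · left
          rw [Prod.mk.injEq] at h'
          exact ⟨h'.1, by rw [hcount0, h'.2]; push_cast; omega⟩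
        · rw [ih y 1 hys] at h'
          rcases h' with ⟨hk, hv⟩ | ⟨hk1, hk2, hv⟩
          · right
            subst hk
            refine ⟨Or.inl rfl, by omega, ?_⟩
            rw [List.count_cons_self]; push_cast; omega
          · right
            have hkc : k ≠ cur := by
              intro e; subst e; exact hnotmem (List.mem_cons_of_mem _ hk1)
            refine ⟨Or.inr hk1, hkc, ?_⟩
            rw [List.count_cons_of_ne hk2.symm]; exact hv
      · rintro (⟨hk, hv⟩ | ⟨hk1, hk2, hv⟩)
        · subst hk
          rw [hcount0] at hv
          push_cast at hv
          left
          rw [Prod.mk.injEq]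
          exact ⟨rfl, by omega⟩
        · right
          rw [ih y 1 hys]
          rcases hk1 with h' | h'
          · left
            refine ⟨h', ?_⟩
            subst h'; rw [List.count_cons_self] at hv; push_cast at hv ⊢; omega
          · by_cases hky : k = y
            · left
              refine ⟨hky, ?_⟩
              subst hky; rw [List.count_cons_self] at hv; push_cast at hv ⊢; omega
            · right
              refine ⟨h', hky, ?_⟩
              rw [List.count_cons_of_ne (Ne.symm hky)] at hv; exact hv

-- A's counting loop is collections.Counter
theorem fold_eq_counter (stseq : List Int) :
    stseq.foldl (fun d ang =>
      if d.contains ang then d.insert ang (d.getD ang 0 + 1) else d.insert ang 1)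
      PySem.Dict.empty = PySem.Dict.counter stseq := by
  rw [← PySem.Dict.foldl_insert_getD_add_one_eq_counter]
  apply PySem.List.foldl_congr_mem
  intro d x _
  by_cases h : d.contains x = true
  · rw [if_pos h]
  · rw [if_neg h]
    have hf : d.contains x = false := by simpa using h
    rw [PySem.Dict.getD_of_not_contains d 0 hf]
    norm_num

theorem stacking_to_layup2_eq (stseq : List Int) :
    stacking_to_layup2 stseq = stacking_to_layup2_alt stseq := by
  unfold stacking_to_layup2 stacking_to_layup2_alt
  rw [fold_eq_counter]
  rcases hs : PySem.List.sorted stseq (fun x => x) false with _ | ⟨x, xs⟩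
  · have hnil : stseq = [] := by
      have := PySem.List.sorted_perm stseq (fun x => x) false
      rw [hs] at this
      exact (List.Perm.nil_eq this).symm
    subst hnil
    rfl
  · show PySem.List.sorted (PySem.Dict.counter stseq).items (fun x => x.1) false = runLoop x 1 xs
    have hperm : (x :: xs).Perm stseq := by
      have := PySem.List.sorted_perm stseq (fun x => x) false
      rwa [hs] at this
    have hpw : (x :: xs).Pairwise (· ≤ ·) := by
      have := PySem.List.sorted_pairwise (xs := stseq) (key := fun x => x)
      rw [hs] at this
      simpa using this
    apply PySem.List.sorted_eq_of_perm_of_pairwise_lt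
    · -- Perm via Nodup + same members
      have hBpw := runLoop_pairwise xs x 1 hpw
      have hBnodup : (runLoop x 1 xs).Nodup :=
        hBpw.imp (fun h => by intro e; rw [e] at h; exact lt_irrefl _ h)
      have hInodup : ((PySem.Dict.counter stseq).items).Nodup := by
        have hk : ((PySem.Dict.counter stseq).items.map (·.1)).Nodup := by
          have := PySem.Dict.nodup_keys_counter (xs := stseq)
          simpa [PySem.Dict.keys] using this
        exact hk.of_map
      rw [List.perm_ext_iff_of_nodup hBnodup hInodup]
      rintro ⟨k, v⟩
      rw [runLoop_mem xs x 1 hpw k v, PySem.Dict.items_counter]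
      have hmemk : ∀ j : Int, j ∈ x :: xs ↔ j ∈ stseq := fun j => hperm.mem_iff
      have hcnt : ∀ j : Int, (x :: xs).count j = stseq.count j := fun j => hperm.count_eq j
      constructor
      · rintro (⟨hk, hv⟩ | ⟨hk1, hk2, hv⟩)
        · subst hk
          refine List.mem_map.mpr ⟨k, (PySem.Set.mem_ofList _ _).mpr ((hmemk k).mp List.mem_cons_self), ?_⟩
          have hc := hcnt k; rw [List.count_cons_self] at hc
          have hv' : ((stseq.count k : Nat) : Int) = v := by rw [← hc]; push_cast; omega
          rw [hv']
        · refine List.mem_map.mpr ⟨k, (PySem.Set.mem_ofList _ _).mpr ((hmemk k).mp (List.mem_cons_of_mem _ hk1)), ?_⟩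
          have hc := hcnt k; rw [List.count_cons_of_ne hk2.symm] at hc
          have hv' : ((stseq.count k : Nat) : Int) = v := by rw [← hc]; exact hv.symm
          rw [hv']
      · intro hmem
        rcases List.mem_map.mp hmem with ⟨j, hj, hjeq⟩
        injection hjeq with hjk hjv
        subst hjk
        have hks : j ∈ x :: xs := (hmemk j).mpr ((PySem.Set.mem_ofList _ _).mp hj)
        by_cases hkx : j = x
        · left
          refine ⟨hkx, ?_⟩
          subst hkx
          have hc := hcnt j; rw [List.count_cons_self] at hc
          rw [← hjv, ← hc]; push_cast; omega
        · right
          refine ⟨(List.mem_cons.mp hks).resolve_left hkx, hkx, ?_⟩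
          have hc := hcnt j; rw [List.count_cons_of_ne (fun e => hkx e.symm)] at hc
          rw [← hjv, ← hc]
    · exact runLoop_pairwise xs x 1 hpw

-- ===== VERDICT (by name: the statement is the Claim_ definition above) =====
theorem stacking_to_layup2_spec : Claim_equal_stacking_to_layup2 := by
  intro stseq _
  unfold Spec_stacking_to_layup2
  exact stacking_to_layup2_eq stseq
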